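-- pv_equiv track=rewrite | github.com/tiborsimon/projects | projects/gui/project_selector.py | _get_pattern_list
-- ===== SOURCE A (Python) =====
-- def _get_pattern_list(keys):
--     ret = []
--     for i in reversed(range(1, len(keys)+1)):
--         temp = ['']
--         for j in range(len(keys)):
--             if j < i:
--                 temp[0] += keys[j]
--             else:
--                 temp.append('[^{}]*'.format(keys[j]))
--                 temp.append(keys[j])
--         for k in range(len(temp)):
--             if '^' not in temp[k]:
--                 temp[k] = '({})'.format(temp[k].replace('.', '\\.'))
--         ret.append(''.join(temp))
--     return ret
-- ===== SOURCE B (Python) =====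
-- def _wrap(s):
--     return s if '^' in s else '({})'.format(s.replace('.', '\\.'))
--
--
-- def _get_pattern_list(keys):
--     if not keys:
--         return []
--     *init, last = keys
--     ext = '[^{}]*{}'.format(last, _wrap(last))
--     return [_wrap(''.join(keys))] + [p + ext for p in _get_pattern_list(init)]
-- ===== Notes on version B (the rewrite author's own statement) =====
-- stated objective: alternative
-- what changed: Replaces A's per-cut index loop (j<i branch mutating temp[0]) plus separate whole-list decorate pass by a structural recursion on the last key: patterns(keys) = wrap(join(keys)) consed onto patterns(init) with each pattern extended by the shared suffix '[^last]*'+wrap(last).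
import Mathlib
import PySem

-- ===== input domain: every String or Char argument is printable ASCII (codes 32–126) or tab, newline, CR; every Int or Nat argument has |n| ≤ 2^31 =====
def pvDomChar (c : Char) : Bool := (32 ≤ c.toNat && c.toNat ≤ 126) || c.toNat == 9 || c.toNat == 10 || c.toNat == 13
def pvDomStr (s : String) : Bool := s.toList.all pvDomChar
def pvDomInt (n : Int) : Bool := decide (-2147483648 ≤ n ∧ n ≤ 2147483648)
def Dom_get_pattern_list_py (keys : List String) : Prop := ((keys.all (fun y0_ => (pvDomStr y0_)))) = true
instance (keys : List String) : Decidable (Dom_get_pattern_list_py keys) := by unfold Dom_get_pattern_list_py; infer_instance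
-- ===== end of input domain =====

-- B replaces A's index-branch build loop plus separate decorate pass by a structural
-- recursion on the last key, extending all shorter patterns by a shared suffix (objective: alternative).


-- ===== PORT A =====
-- '[^{}]*'.format(k)
def pvBracketA (k : List Char) : List Char := '[' :: '^' :: k ++ [']', '*']

-- the decorate pass: if '^' not in t: t = '({})'.format(t.replace('.', '\\.'))
def pvDecorA (t : List Char) : List Char :=
  if PySem.Chars.isIn ['^'] t then t
  else '(' :: PySem.Chars.replace t ['.'] ['\\', '.'] ++ [')']

-- temp[0] += s
def pvAddHead (temp : List (List Char)) (s : List Char) : List (List Char) :=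
  match temp with
  | [] => []
  | h :: t => (h ++ s) :: t

def get_pattern_list_py (keys : List String) : List String :=
  let ks := keys.map String.toList
  ((PySem.List.pyRange 1 ((ks.length : Int) + 1)).reverse).foldl (fun ret i =>
    ret ++ [String.ofList (PySem.Chars.join []
      (((PySem.List.pyRange 0 (ks.length : Int)).foldl (fun temp j =>
        if j < i then pvAddHead temp (PySem.List.pyGetD ks j [])
        else temp ++ [pvBracketA (PySem.List.pyGetD ks j []), PySem.List.pyGetD ks j []]) [[]]).map pvDecorA))]) []

-- ===== PORT B =====
-- _wrap(s): s if '^' in s else '({})'.format(s.replace('.', '\\.'))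
def pvWrapB (s : List Char) : List Char :=
  if PySem.Chars.isIn ['^'] s then s
  else '(' :: PySem.Chars.replace s ['.'] ['\\', '.'] ++ [')']

-- '*init, last = keys'; return [_wrap(''.join(keys))] + [p + ext for p in rec(init)]
def pvAltCore : List (List Char) → List (List Char)
  | [] => []
  | k0 :: rest =>
      let init := (k0 :: rest).dropLast
      let lastk := (k0 :: rest).getLastD []
      let ext := '[' :: '^' :: lastk ++ [']', '*'] ++ pvWrapB lastk
      pvWrapB (PySem.Chars.join [] (k0 :: rest)) :: (pvAltCore init).map (fun p => p ++ ext)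
  termination_by ks => ks.length
  decreasing_by simp

def get_pattern_list_py_alt (keys : List String) : List String :=
  (pvAltCore (keys.map String.toList)).map String.ofList

-- ===== PRECONDITION & SPEC =====
def Spec_get_pattern_list_py (keys : List String) (out : List String) : Prop := out = get_pattern_list_py_alt keys
instance (keys : List String) (out : List String) : Decidable (Spec_get_pattern_list_py keys out) := by unfold Spec_get_pattern_list_py; infer_instance

-- ===== CLAIM (what is proved, stated in full; the proofs are below) =====
def Claim_equal_get_pattern_list_py : Prop := ∀ (keys : List String), Dom_get_pattern_list_py keys → Spec_get_pattern_list_py keys (get_pattern_list_py keys)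

-- ===== LEMMAS AND PROOFS =====

-- the common mathematical form of the pattern for cut p
def patAt (ks : List (List Char)) (p : Nat) : List Char :=
  pvWrapB (ks.take p).flatten ++ (ks.drop p).flatMap (fun k => pvBracketA k ++ pvWrapB k)

-- ''.join(l) is concatenation
lemma join_nil_eq_flatten (l : List (List Char)) : PySem.Chars.join [] l = l.flatten := by
  match l with
  | [] => simp [PySem.Chars.join_nil]
  | [p] => simp [PySem.Chars.join_singleton]
  | p :: q :: rest =>
      rw [PySem.Chars.join_cons_cons]
      simp [join_nil_eq_flatten (q :: rest)]

-- the bracket part always contains '^', so decorate leaves it unchanged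
lemma decorA_bracket (k : List Char) : pvDecorA (pvBracketA k) = pvBracketA k := by
  have h : PySem.Chars.isIn ['^'] ('[' :: '^' :: k ++ [']', '*']) = true := by
    rw [PySem.Chars.isIn_iff_infix]; exact ⟨['['], k ++ [']', '*'], rfl⟩
  unfold pvDecorA pvBracketA; rw [h]; simp

-- A's prefix-accumulation loop concatenates keys[:p] onto temp[0]
lemma foldl_addHead (ks : List (List Char)) (p : Nat) (hp : p ≤ ks.length) (c : List Char) :
    (PySem.List.pyRange 0 (p : Int)).foldl (fun temp j => pvAddHead temp (PySem.List.pyGetD ks j [])) [c]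
      = [c ++ (ks.take p).flatten] := by
  induction p generalizing c with
  | zero => simp [PySem.List.pyRange_one_eq_nil]
  | succ m ih =>
      have hm : m ≤ ks.length := Nat.le_of_succ_le hp
      have hstep : (0 : Int) ≤ (m : Int) := by positivity
      rw [show ((m + 1 : Nat) : Int) = (m : Int) + 1 by push_cast; ring,
          PySem.List.pyRange_one_succ_right hstep, List.foldl_append, ih hm]
      have hlt : m < ks.length := hp
      rw [List.take_add_one, List.getElem?_eq_getElem hlt, List.flatten_append]
      simp [pvAddHead, PySem.List.pyGetD_natCast, List.getElem?_eq_getElem hlt]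

-- flattening a list of two-element chunks
lemma flatten_pairs (g h : List Char → List Char) (l : List (List Char)) :
    (l.flatMap (fun a => [g a, h a])).flatten = l.flatMap (fun a => g a ++ h a) := by
  induction l with
  | nil => simp
  | cons x xs ih => simp [ih]

-- A's inner build loop, characterised
lemma buildA_eq (ks : List (List Char)) (p : Nat) (hp : p ≤ ks.length) :
    (PySem.List.pyRange 0 (ks.length : Int)).foldl (fun temp j =>
        if j < (p : Int) then pvAddHead temp (PySem.List.pyGetD ks j [])
        else temp ++ [pvBracketA (PySem.List.pyGetD ks j []), PySem.List.pyGetD ks j []]) [[]]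
      = [(ks.take p).flatten] ++ (ks.drop p).flatMap (fun k => [pvBracketA k, k]) := by
  have hsplit := PySem.List.pyRange_one_append 0 (p : Int) (ks.length : Int)
    (by positivity) (by exact_mod_cast hp)
  rw [hsplit, List.foldl_append]
  have h1 : (PySem.List.pyRange 0 (p : Int)).foldl (fun temp j =>
        if j < (p : Int) then pvAddHead temp (PySem.List.pyGetD ks j [])
        else temp ++ [pvBracketA (PySem.List.pyGetD ks j []), PySem.List.pyGetD ks j []]) [[]]
      = [(ks.take p).flatten] := by
    rw [PySem.List.foldl_congr_mem _ _ (fun temp j => pvAddHead temp (PySem.List.pyGetD ks j [])) _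
        (by intro acc x hx; rw [PySem.List.mem_pyRange_one] at hx; simp [hx.2])]
    simpa using foldl_addHead ks p hp []
  rw [h1]
  have h2 : ∀ init : List (List Char), (PySem.List.pyRange (p : Int) (ks.length : Int)).foldl (fun temp j =>
        if j < (p : Int) then pvAddHead temp (PySem.List.pyGetD ks j [])
        else temp ++ [pvBracketA (PySem.List.pyGetD ks j []), PySem.List.pyGetD ks j []]) init
      = init ++ (ks.drop p).flatMap (fun k => [pvBracketA k, k]) := by
    intro init
    rw [PySem.List.foldl_congr_mem _ _
        (fun temp j => temp ++ [pvBracketA (PySem.List.pyGetD ks j []), PySem.List.pyGetD ks j []]) _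
        (by intro acc x hx; rw [PySem.List.mem_pyRange_one] at hx
            have : ¬ (x < (p : Int)) := not_lt.mpr hx.1
            simp [this])]
    have := PySem.List.foldl_pyRange_pyGetD ks [] (fun acc k => acc ++ [pvBracketA k, k]) init
      (a := (p : Int)) (by positivity)
    simp only [PySem.List.len] at this
    rw [this, PySem.List.foldl_append_eq_flatMap]
    simp only [Int.toNat_natCast]
  exact h2 _

-- A's per-iteration value is patAt
lemma iterA_eq (ks : List (List Char)) (p : Nat) (hp : p ≤ ks.length) :
    PySem.Chars.join []
      (((PySem.List.pyRange 0 (ks.length : Int)).foldl (fun temp j =>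
        if j < (p : Int) then pvAddHead temp (PySem.List.pyGetD ks j [])
        else temp ++ [pvBracketA (PySem.List.pyGetD ks j []), PySem.List.pyGetD ks j []]) [[]]).map pvDecorA)
      = patAt ks p := by
  rw [buildA_eq ks p hp, join_nil_eq_flatten]
  simp only [List.map_append, List.map_flatMap, List.map_cons, List.map_nil,
    List.flatten_append]
  simp only [decorA_bracket, patAt]
  simp only [show ∀ t : List Char, pvDecorA t = pvWrapB t from fun _ => rfl]
  rw [flatten_pairs]
  simp

-- B's recursion step on init ++ [k]
lemma altCore_concat (init : List (List Char)) (k : List Char) :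
    pvAltCore (init ++ [k])
      = pvWrapB (PySem.Chars.join [] (init ++ [k]))
          :: (pvAltCore init).map (fun p => p ++ ('[' :: '^' :: k ++ [']', '*'] ++ pvWrapB k)) := by
  cases init with
  | nil => simp [pvAltCore]
  | cons i0 irest =>
      rw [show (i0 :: irest) ++ [k] = i0 :: (irest ++ [k]) from rfl, pvAltCore]
      have h1 : (i0 :: (irest ++ [k])).dropLast = i0 :: irest := by
        rw [show i0 :: (irest ++ [k]) = (i0 :: irest) ++ [k] from rfl, List.dropLast_concat]
      have h2 : (i0 :: (irest ++ [k])).getLastD [] = k := by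
        have h : (i0 :: (irest ++ [k])).getLast? = some k := by
          rw [show i0 :: (irest ++ [k]) = (i0 :: irest) ++ [k] from rfl]
          exact List.getLast?_concat
        rw [List.getLastD_eq_getLast?, h]
        rfl
      rw [h1, h2]

-- B's result, characterised by patAt at descending cuts
lemma altCore_eq (ks : List (List Char)) :
    pvAltCore ks = (List.range ks.length).reverse.map (fun j => patAt ks (j + 1)) := by
  induction ks using List.reverseRecOn with
  | nil => simp [pvAltCore]
  | append_singleton init k ih =>
      rw [altCore_concat, ih]
      have hlen : (init ++ [k]).length = init.length + 1 := by simp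
      rw [hlen, List.range_succ, List.reverse_append, List.reverse_singleton]
      simp only [List.singleton_append, List.map_cons, List.map_map]
      congr 1
      · -- head: cut = full length
        unfold patAt
        rw [join_nil_eq_flatten,
            show init.length + 1 = (init ++ [k]).length by simp,
            List.take_length, List.drop_length]
        simp
      · -- tail: each shorter cut gains the common extension
        apply List.map_congr_left
        intro j hj
        rw [List.mem_reverse, List.mem_range] at hj
        unfold patAt
        simp only [Function.comp_apply]
        rw [List.take_append_of_le_length (by omega), List.drop_append_of_le_length (by omega)]
        rw [List.flatMap_append]
        simp [pvBracketA, List.append_assoc]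

-- ===== VERDICT (by name: the statement is the Claim_ definition above) =====
theorem get_pattern_list_py_spec : Claim_equal_get_pattern_list_py := by
  intro keys _
  unfold Spec_get_pattern_list_py get_pattern_list_py get_pattern_list_py_alt
  set ks := keys.map String.toList with hks
  rw [PySem.List.foldl_append_singleton_eq_map, altCore_eq]
  have hmc : ∀ i ∈ (PySem.List.pyRange 1 ((ks.length : Int) + 1)).reverse,
      String.ofList (PySem.Chars.join []
        (((PySem.List.pyRange 0 (ks.length : Int)).foldl (fun temp j =>
          if j < i then pvAddHead temp (PySem.List.pyGetD ks j [])
          else temp ++ [pvBracketA (PySem.List.pyGetD ks j []), PySem.List.pyGetD ks j []]) [[]]).map pvDecorA))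
        = String.ofList (patAt ks i.toNat) := by
    intro i hi
    rw [List.mem_reverse, PySem.List.mem_pyRange_one] at hi
    have hip : i = ((i.toNat : Nat) : Int) := (Int.toNat_of_nonneg (by omega)).symm
    rw [hip, iterA_eq ks i.toNat (by omega)]
    rw [Int.toNat_natCast]
  rw [List.map_congr_left hmc]
  rw [show ((ks.length : Int) + 1) = ((ks.length + 1 : Nat) : Int) by push_cast; ring]
  rw [PySem.List.pyRange_one]
  rw [show ((ks.length + 1 : Nat) : Int) - 1 = ((ks.length : Nat) : Int) by push_cast; ring]
  simp only [Int.toNat_natCast, List.nil_append, List.map_reverse, List.map_map]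
  apply congrArg List.reverse
  apply List.map_congr_left
  intro j hj
  simp only [Function.comp_apply]
  rw [show ((1 : Int) + (j : Int)).toNat = j + 1 by omega]
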